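-- pv_equiv track=rewrite | github.com/SerhatSoruklu/chatpdm | scripts/pdf_structured_read.py | normalize_page_text
-- ===== SOURCE A (Python) =====
-- def normalize_page_text(text: str) -> str:
--     lines = [line.rstrip() for line in text.splitlines()]
--     paragraphs: list[str] = []
--     current: list[str] = []
--
--     for line in lines:
--         stripped = line.strip()
--         if not stripped:
--             if current:
--                 paragraphs.append(" ".join(current))
--                 current = []
--             continue
--         current.append(stripped)
--
--     if current:
--         paragraphs.append(" ".join(current))
--
--     return "\n\n".join(paragraphs)
-- ===== SOURCE B (Python) =====
-- def normalize_page_text(text: str) -> str: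
--     lines = [line.strip() for line in text.splitlines()]
--     paragraphs: list[str] = []
--     rest = lines
--     while rest:
--         if rest[0]:
--             k = 0
--             while k < len(rest) and rest[k]:
--                 k += 1
--             paragraphs.append(" ".join(rest[:k]))
--             rest = rest[k:]
--         else:
--             rest = rest[1:]
--     return "\n\n".join(paragraphs)
-- ===== Notes on version B (the rewrite author's own statement) =====
-- stated objective: alternative
-- what changed: Replaces A's flush-accumulator state machine (paragraphs/current with manual flush on blank lines and at the end) by run-grouping: strip all lines once, then repeatedly skip blank lines and take each maximal run of non-blank lines as one paragraph.
import Mathlib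
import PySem

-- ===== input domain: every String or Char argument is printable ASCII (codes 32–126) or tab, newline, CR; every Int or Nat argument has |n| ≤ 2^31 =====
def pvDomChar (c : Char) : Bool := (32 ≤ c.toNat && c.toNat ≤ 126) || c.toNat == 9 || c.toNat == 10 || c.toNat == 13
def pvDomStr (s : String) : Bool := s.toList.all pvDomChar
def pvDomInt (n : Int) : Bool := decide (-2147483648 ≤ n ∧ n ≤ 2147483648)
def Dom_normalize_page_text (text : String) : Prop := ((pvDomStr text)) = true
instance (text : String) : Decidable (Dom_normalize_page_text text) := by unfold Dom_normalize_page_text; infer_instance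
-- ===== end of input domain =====

-- B replaces A's flush-accumulator state machine by run-grouping over the stripped lines (idiomatic decomposition, same cost).

-- ===== PORT A =====
def normalize_page_text (text : String) : String :=
  let lines := (PySem.Chars.splitlines text.toList).map (fun line => PySem.Chars.rstrip line)
  let st := lines.foldl
    (fun (acc : List (List Char) × List (List Char)) line =>
      let stripped := PySem.Chars.strip line
      if stripped = [] then
        (if acc.2 ≠ [] then (acc.1 ++ [PySem.Chars.join [' '] acc.2], ([] : List (List Char))) else acc)
      else (acc.1, acc.2 ++ [stripped]))
    ([], [])
  let paragraphs := if st.2 ≠ [] then st.1 ++ [PySem.Chars.join [' '] st.2] else st.1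
  String.mk (PySem.Chars.join ['\n', '\n'] paragraphs)

-- ===== PORT B =====
-- run-grouping: skip blank lines; each maximal run of non-blank lines becomes one paragraph
def pvAltGo : List (List Char) → List (List Char)
  | [] => []
  | x :: rest =>
    if x = [] then pvAltGo rest
    else
      PySem.Chars.join [' '] ((x :: rest).takeWhile (fun y => !y.isEmpty)) ::
        pvAltGo ((x :: rest).dropWhile (fun y => !y.isEmpty))
  termination_by xs => xs.length
  decreasing_by
  all_goals simp_all
  have := List.length_dropWhile_le (fun y : List Char => !y.isEmpty) rest
  omega

def normalize_page_text_alt (text : String) : String :=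
  let lines := (PySem.Chars.splitlines text.toList).map (fun line => PySem.Chars.strip line)
  String.mk (PySem.Chars.join ['\n', '\n'] (pvAltGo lines))

-- ===== PRECONDITION & SPEC =====
def Spec_normalize_page_text (text : String) (out : String) : Prop := out = normalize_page_text_alt text
instance (text : String) (out : String) : Decidable (Spec_normalize_page_text text out) := by unfold Spec_normalize_page_text; infer_instance

-- ===== CLAIM (what is proved, stated in full; the proofs are below) =====
def Claim_equal_normalize_page_text : Prop := ∀ (text : String), Dom_normalize_page_text text → Spec_normalize_page_text text (normalize_page_text text)

-- ===== LEMMAS AND PROOFS =====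

def pvStep (acc : List (List Char) × List (List Char)) (line : List Char) :
    List (List Char) × List (List Char) :=
  let stripped := PySem.Chars.strip line
  if stripped = [] then
    (if acc.2 ≠ [] then (acc.1 ++ [PySem.Chars.join [' '] acc.2], ([] : List (List Char))) else acc)
  else (acc.1, acc.2 ++ [stripped])

def pvFin (s : List (List Char) × List (List Char)) : List (List Char) :=
  if s.2 ≠ [] then s.1 ++ [PySem.Chars.join [' '] s.2] else s.1

lemma pvA_eq (text : String) :
    normalize_page_text text =
      String.mk (PySem.Chars.join ['\n', '\n']
        (pvFin (((PySem.Chars.splitlines text.toList).map (fun l => PySem.Chars.rstrip l)).foldl pvStep ([], [])))) := rfl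

lemma pvB_eq (text : String) :
    normalize_page_text_alt text =
      String.mk (PySem.Chars.join ['\n', '\n']
        (pvAltGo ((PySem.Chars.splitlines text.toList).map (fun l => PySem.Chars.strip l)))) := rfl

lemma pv_dwdw {α : Type} (p : α → Bool) (l : List α) :
    (l.dropWhile p).dropWhile p = l.dropWhile p := by
  induction l with
  | nil => simp
  | cons a l ih =>
    by_cases h : p a
    · simpa [List.dropWhile_cons, h] using ih
    · simp [List.dropWhile_cons, h]

lemma pv_strip_nil : PySem.Chars.strip [] = [] := rfl

lemma pv_strip_def (l : List Char) :
    PySem.Chars.strip l = PySem.Chars.rstrip (PySem.Chars.lstrip l) := rfl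

lemma pv_lstrip_cons_pos {a : Char} (l : List Char) (ha : PySem.Chars.isspace a = true) :
    PySem.Chars.lstrip (a :: l) = PySem.Chars.lstrip l := by
  simp [PySem.Chars.lstrip, List.dropWhile_cons, ha]

lemma pv_lstrip_cons_neg {a : Char} (l : List Char) (ha : PySem.Chars.isspace a = false) :
    PySem.Chars.lstrip (a :: l) = a :: l := by
  simp [PySem.Chars.lstrip, List.dropWhile_cons, ha]

lemma pv_rstrip_nil_iff (l : List Char) :
    PySem.Chars.rstrip l = [] ↔ ∀ c ∈ l, PySem.Chars.isspace c := by
  rw [PySem.Chars.rstrip, List.reverse_eq_nil_iff, List.dropWhile_eq_nil_iff]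
  simp

lemma pv_lstrip_nil_iff (l : List Char) :
    PySem.Chars.lstrip l = [] ↔ ∀ c ∈ l, PySem.Chars.isspace c := by
  rw [PySem.Chars.lstrip, List.dropWhile_eq_nil_iff]

lemma pv_rstrip_idem (l : List Char) :
    PySem.Chars.rstrip (PySem.Chars.rstrip l) = PySem.Chars.rstrip l := by
  simp [PySem.Chars.rstrip, pv_dwdw]

lemma pv_lstrip_idem (l : List Char) :
    PySem.Chars.lstrip (PySem.Chars.lstrip l) = PySem.Chars.lstrip l := by
  simp [PySem.Chars.lstrip, pv_dwdw]

lemma pv_rstrip_cons (a : Char) (l : List Char) :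
    PySem.Chars.rstrip (a :: l) =
      if PySem.Chars.rstrip l = [] then (if PySem.Chars.isspace a then [] else [a])
      else a :: PySem.Chars.rstrip l := by
  simp only [PySem.Chars.rstrip, List.reverse_cons, List.dropWhile_append,
    List.reverse_eq_nil_iff, List.isEmpty_iff]
  by_cases h : List.dropWhile PySem.Chars.isspace l.reverse = []
  · by_cases ha : PySem.Chars.isspace a <;> simp [h, List.dropWhile_cons, ha]
  · simp [h]

lemma pv_strip_rstrip (l : List Char) :
    PySem.Chars.strip (PySem.Chars.rstrip l) = PySem.Chars.strip l := by
  induction l with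
  | nil => rfl
  | cons a l ih =>
    by_cases ha : PySem.Chars.isspace a
    · by_cases h : PySem.Chars.rstrip l = []
      · have hl : PySem.Chars.lstrip l = [] := by
          rw [pv_lstrip_nil_iff]; exact (pv_rstrip_nil_iff l).mp h
        rw [pv_rstrip_cons, if_pos h, if_pos ha, pv_strip_def (a :: l),
          pv_lstrip_cons_pos l ha, hl]
        rfl
      · rw [pv_rstrip_cons, if_neg h, pv_strip_def, pv_lstrip_cons_pos _ ha,
          pv_strip_def (a :: l), pv_lstrip_cons_pos l ha, ← pv_strip_def, ← pv_strip_def, ih]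
    · have ha' : PySem.Chars.isspace a = false := by simpa using ha
      by_cases h : PySem.Chars.rstrip l = []
      · have hl : PySem.Chars.lstrip l = [] := by
          rw [pv_lstrip_nil_iff]; exact (pv_rstrip_nil_iff l).mp h
        rw [pv_rstrip_cons, if_pos h, if_neg (by simp [ha]), pv_strip_def,
          pv_lstrip_cons_neg [] ha', pv_strip_def (a :: l), pv_lstrip_cons_neg l ha',
          pv_rstrip_cons, pv_rstrip_cons, h]
        rfl
      · have h2 : PySem.Chars.rstrip (PySem.Chars.rstrip l) ≠ [] := by
          rw [pv_rstrip_idem]; exact h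
        rw [pv_rstrip_cons, if_neg h, pv_strip_def, pv_lstrip_cons_neg _ ha',
          pv_strip_def (a :: l), pv_lstrip_cons_neg l ha', pv_rstrip_cons, pv_rstrip_cons,
          if_neg h2, if_neg h, pv_rstrip_idem]

lemma pv_lstrip_rstrip_fixed (l : List Char) (h : PySem.Chars.lstrip l = l) :
    PySem.Chars.lstrip (PySem.Chars.rstrip l) = PySem.Chars.rstrip l := by
  cases l with
  | nil => rfl
  | cons a t =>
    have ha : PySem.Chars.isspace a = false := by
      by_contra hc
      have ha' : PySem.Chars.isspace a = true := by simpa using hc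
      have := congrArg List.length (h.symm.trans (pv_lstrip_cons_pos t ha'))
      have hle := List.length_dropWhile_le PySem.Chars.isspace t
      simp [PySem.Chars.lstrip] at this hle
      omega
    rw [pv_rstrip_cons]
    by_cases h0 : PySem.Chars.rstrip t = []
    · simp only [h0, if_pos, ha, if_true]
      simp [ha, pv_lstrip_cons_neg]
    · rw [if_neg h0, pv_lstrip_cons_neg _ ha]

lemma pv_strip_strip (l : List Char) :
    PySem.Chars.strip (PySem.Chars.strip l) = PySem.Chars.strip l := by
  rw [pv_strip_def, pv_strip_def l, pv_lstrip_rstrip_fixed _ (pv_lstrip_idem l), pv_rstrip_idem]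

lemma pv_fin_append (p q : List (List Char)) (c : List (List Char)) :
    pvFin (p ++ q, c) = p ++ pvFin (q, c) := by
  by_cases h : c = [] <;> simp [pvFin, h]

lemma pv_shift (xs : List (List Char)) (p c : List (List Char)) :
    xs.foldl pvStep (p, c) =
      (p ++ (xs.foldl pvStep ([], c)).1, (xs.foldl pvStep ([], c)).2) := by
  induction xs generalizing p c with
  | nil => simp
  | cons x rest ih =>
    simp only [List.foldl_cons]
    by_cases hx : PySem.Chars.strip x = []
    · by_cases hc : c = []
      · rw [show pvStep (p, c) x = (p, c) by simp [pvStep, hx, hc],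
          show pvStep (([] : List (List Char)), c) x = ([], c) by simp [pvStep, hx, hc]]
        exact ih p c
      · rw [show pvStep (p, c) x = (p ++ [PySem.Chars.join [' '] c], []) by simp [pvStep, hx, hc],
          show pvStep (([] : List (List Char)), c) x = ([PySem.Chars.join [' '] c], []) by simp [pvStep, hx, hc]]
        rw [ih (p ++ [PySem.Chars.join [' '] c]) [], ih [PySem.Chars.join [' '] c] []]
        simp
    · rw [show pvStep (p, c) x = (p, c ++ [PySem.Chars.strip x]) by simp [pvStep, hx],
        show pvStep (([] : List (List Char)), c) x = ([], c ++ [PySem.Chars.strip x]) by simp [pvStep, hx]]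
      exact ih p _

lemma pv_main (n : Nat) : ∀ xs : List (List Char), xs.length ≤ n →
    (∀ x ∈ xs, PySem.Chars.strip x = x) →
    (pvFin (xs.foldl pvStep ([], [])) = pvAltGo xs ∧
    (∀ c : List (List Char), c ≠ [] →
      pvFin (xs.foldl pvStep ([], c)) =
        PySem.Chars.join [' '] (c ++ xs.takeWhile (fun y => !y.isEmpty)) ::
          pvAltGo (xs.dropWhile (fun y => !y.isEmpty)))) := by
  induction n with
  | zero =>
    intro xs hlen hstr
    have : xs = [] := List.length_eq_zero_iff.mp (Nat.le_zero.mp hlen)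
    subst this
    constructor
    · simp [pvFin, pvAltGo]
    · intro c hc; simp [pvFin, hc, pvAltGo]
  | succ n ih =>
    intro xs hlen hstr
    cases xs with
    | nil =>
      constructor
      · simp [pvFin, pvAltGo]
      · intro c hc; simp [pvFin, hc, pvAltGo]
    | cons x rest =>
      have hrest : rest.length ≤ n := by simpa using Nat.lt_succ_iff.mp (Nat.lt_of_lt_of_le (by simp) hlen)
      have hstr' : ∀ y ∈ rest, PySem.Chars.strip y = y := fun y hy => hstr y (List.mem_cons_of_mem x hy)
      have hxs : PySem.Chars.strip x = x := hstr x List.mem_cons_self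
      obtain ⟨ih1, ih2⟩ := ih rest hrest hstr'
      by_cases hx : x = []
      · subst hx
        constructor
        · rw [List.foldl_cons, show pvStep (([] : List (List Char)), []) [] = ([], []) by simp [pvStep, pv_strip_nil],
            pvAltGo, if_pos rfl]
          exact ih1
        · intro c hc
          rw [List.foldl_cons,
            show pvStep (([] : List (List Char)), c) [] = ([PySem.Chars.join [' '] c], []) by
              simp [pvStep, hc, pv_strip_nil],
            pv_shift rest [PySem.Chars.join [' '] c] [],
            show ∀ s : List (List Char) × List (List Char),
              pvFin ([PySem.Chars.join [' '] c] ++ s.1, s.2) = pvFin (([PySem.Chars.join [' '] c] ++ s.1, s.2)) from fun _ => rfl]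
          rw [show ([PySem.Chars.join [' '] c] ++ (rest.foldl pvStep ([], [])).1,
                (rest.foldl pvStep ([], [])).2) =
              (([PySem.Chars.join [' '] c] : List (List Char)) ++ (rest.foldl pvStep ([], [])).1,
                (rest.foldl pvStep ([], [])).2) from rfl]
          rw [show pvFin (([PySem.Chars.join [' '] c] : List (List Char)) ++ (rest.foldl pvStep ([], [])).1,
                (rest.foldl pvStep ([], [])).2) =
              [PySem.Chars.join [' '] c] ++ pvFin ((rest.foldl pvStep ([], [])).1,
                (rest.foldl pvStep ([], [])).2) from pv_fin_append _ _ _]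
          rw [show ((rest.foldl pvStep ([], [])).1, (rest.foldl pvStep ([], [])).2) =
              rest.foldl pvStep ([], []) from rfl, ih1]
          simp [pvAltGo]
      · have hxne : PySem.Chars.strip x ≠ [] := by rw [hxs]; exact hx
        have hstep : ∀ c : List (List Char), pvStep ([], c) x = ([], c ++ [x]) := by
          intro c; simp [pvStep, hxs, hx]
        constructor
        · rw [List.foldl_cons, hstep]
          simp only [List.nil_append]
          rw [ih2 [x] (by simp)]
          rw [pvAltGo, if_neg hx]
          simp [List.takeWhile_cons, hx]
        · intro c hc
          rw [List.foldl_cons, hstep, ih2 (c ++ [x]) (by simp)]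
          simp [List.takeWhile_cons, hx]

theorem pv_equiv (text : String) : normalize_page_text text = normalize_page_text_alt text := by
  rw [pvA_eq, pvB_eq]
  have hfold :
      ((PySem.Chars.splitlines text.toList).map (fun l => PySem.Chars.rstrip l)).foldl pvStep ([], []) =
      ((PySem.Chars.splitlines text.toList).map (fun l => PySem.Chars.strip l)).foldl pvStep ([], []) := by
    rw [List.foldl_map, List.foldl_map]
    apply List.foldl_ext
    intro acc x _
    simp [pvStep, pv_strip_rstrip, pv_strip_strip]
  rw [hfold]
  congr 1
  congr 1
  exact (pv_main ((PySem.Chars.splitlines text.toList).map (fun l => PySem.Chars.strip l)).length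
    _ le_rfl (by intro y hy; obtain ⟨z, _, rfl⟩ := List.mem_map.mp hy; exact pv_strip_strip z)).1

-- ===== VERDICT (by name: the statement is the Claim_ definition above) =====
theorem normalize_page_text_spec : Claim_equal_normalize_page_text := by
  intro text _
  exact pv_equiv text
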